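-- pv_equiv track=rewrite | github.com/BenjaminAtbi/markup-metrics | metric_engines/xater_metric_stripped.py | stripXML
-- ===== SOURCE A (Python) =====
-- from typing import List
--
-- def stripXML(hypothesis_tokens: List[str]) -> List[str]:
--     if len(hypothesis_tokens) == 0: return hypothesis_tokens
--     if hypothesis_tokens[0].startswith('<') and hypothesis_tokens[-1].endswith('>'):
--         merged_tokens = ''.join(hypothesis_tokens)
--         index_after_open_tag = merged_tokens.find('>') + 1
--         rev_index_before_close_tag = merged_tokens[::-1].find('<') + 1
--         #return unstripped response if it doesn't fit the pattern
--         if index_after_open_tag > len(merged_tokens) - rev_index_before_close_tag: return hypothesis_tokens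
--
--         for token_index, token in enumerate(hypothesis_tokens):
--             if len(token) <= index_after_open_tag:
--                 index_after_open_tag -= len(token)
--             else:
--                 token = token[index_after_open_tag:]
--                 first_token = token_index
--                 break
--         for token_index, token in reversed(list(enumerate(hypothesis_tokens))):
--             if len(token) > rev_index_before_close_tag:
--                 rev_index_before_close_tag -= len(token)
--             else:
--                 token = token[:-rev_index_before_close_tag]
--                 last_token = token_index
--                 break
--         return hypothesis_tokens[first_token:last_token]
--     return hypothesis_tokens
-- ===== SOURCE B (Python) =====
-- from typing import List
-- from bisect import bisect_right
--
-- def stripXML(hypothesis_tokens: List[str]) -> List[str]: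
--     if len(hypothesis_tokens) == 0: return hypothesis_tokens
--     if hypothesis_tokens[0].startswith('<') and hypothesis_tokens[-1].endswith('>'):
--         merged_tokens = ''.join(hypothesis_tokens)
--         index_after_open_tag = merged_tokens.find('>') + 1
--         rev_index_before_close_tag = merged_tokens[::-1].find('<') + 1
--         # return unstripped response if it doesn't fit the pattern
--         if index_after_open_tag > len(merged_tokens) - rev_index_before_close_tag:
--             return hypothesis_tokens
--         prefix = [0]
--         for token in hypothesis_tokens:
--             prefix.append(prefix[-1] + len(token))
--         # first token extending past the open tag's '>'
--         first_token = bisect_right(prefix, index_after_open_tag) - 1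
--         # first token (from the front) reaching the closing tag's '<'
--         last_token = bisect_right(prefix, len(merged_tokens) - rev_index_before_close_tag) - 1
--         return hypothesis_tokens[first_token:last_token]
--     return hypothesis_tokens
-- ===== Notes on version B (the rewrite author's own statement) =====
-- stated objective: alternative
-- what changed: B replaces A's two subtract-and-break scans over the token list by one cumulative prefix-sum table queried with bisect_right for both boundary indices.
-- intended difference: On inputs entering the stripping branch whose closing tag's '<' lies in a token before the final one, A's reversed loop still breaks at the last token and keeps pieces of the closing tag (at the witness ['<a>', 'x', '<b', '>'] it returns the two tokens 'x' and '<b'), while B ends the slice before the token containing that '<' and returns only the token 'x', the intended strip. — e.g. on stripXML(["<a>", "x", "<b", ">"]): A returns ["x", "<b"], B returns ["x"]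
import Mathlib
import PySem

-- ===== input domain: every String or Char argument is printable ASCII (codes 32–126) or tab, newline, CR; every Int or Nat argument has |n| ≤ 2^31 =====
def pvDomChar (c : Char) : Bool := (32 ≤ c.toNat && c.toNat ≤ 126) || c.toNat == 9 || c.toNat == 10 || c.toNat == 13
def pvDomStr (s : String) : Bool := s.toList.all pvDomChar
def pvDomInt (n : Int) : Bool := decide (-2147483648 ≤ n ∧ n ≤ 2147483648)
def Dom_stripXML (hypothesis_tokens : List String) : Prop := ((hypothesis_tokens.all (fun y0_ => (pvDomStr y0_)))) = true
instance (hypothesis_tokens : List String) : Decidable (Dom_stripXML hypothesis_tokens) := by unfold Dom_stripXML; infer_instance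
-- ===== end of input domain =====

-- B replaces A's two subtract-and-break scans over the tokens by one prefix-sum table
-- queried with bisect (objective: alternative decomposition, same asymptotic cost).

-- ===== PORT A =====
-- A's first 'for' loop: subtract token lengths while they fit, break with the index (none = no break)
def pvFirstLoop : List String → Int → Nat → Option Nat
  | [], _, _ => none
  | t :: rest, idx, i =>
    if PySem.Str.len t ≤ idx then pvFirstLoop rest (idx - PySem.Str.len t) (i + 1)
    else some i

-- A's second 'for' loop over reversed(list(enumerate(...))) (argument list pre-reversed)
def pvLastLoop : List String → Int → Nat → Option Nat
  | [], _, _ => none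
  | t :: rest, rev, i =>
    if PySem.Str.len t > rev then pvLastLoop rest (rev - PySem.Str.len t) (i - 1)
    else some i

def stripXML (hypothesis_tokens : List String) : List String :=
  if hypothesis_tokens.length = 0 then hypothesis_tokens
  else if PySem.Str.startswith hypothesis_tokens.headI "<"
          && PySem.Str.endswith (hypothesis_tokens.getLastD "") ">" then
    let merged : List Char := PySem.Chars.join [] (hypothesis_tokens.map String.toList)
    let idxOpen : Int := PySem.Chars.find merged ['>'] + 1
    -- merged[::-1] is merged.reverse (PySem.Str.slice?_none_none_neg_one)
    let revClose : Int := PySem.Chars.find merged.reverse ['<'] + 1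
    if idxOpen > (merged.length : Int) - revClose then hypothesis_tokens
    else
      match pvFirstLoop hypothesis_tokens idxOpen 0,
            pvLastLoop hypothesis_tokens.reverse revClose (hypothesis_tokens.length - 1) with
      | some f, some l => PySem.List.slice hypothesis_tokens (some (f : Int)) (some (l : Int))
      | _, _ => []   -- Python raises UnboundLocalError here; excluded by Pre_stripXML
  else hypothesis_tokens

-- ===== PORT B =====
-- cumulative prefix sums of the token lengths (Source B's append loop)
def pvPrefix (hypothesis_tokens : List String) : List Int :=
  List.scanl (· + ·) 0 (hypothesis_tokens.map PySem.Str.len)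

def stripXML_alt (hypothesis_tokens : List String) : List String :=
  if hypothesis_tokens.length = 0 then hypothesis_tokens
  else if PySem.Str.startswith hypothesis_tokens.headI "<"
          && PySem.Str.endswith (hypothesis_tokens.getLastD "") ">" then
    let merged : List Char := PySem.Chars.join [] (hypothesis_tokens.map String.toList)
    let idxOpen : Int := PySem.Chars.find merged ['>'] + 1
    let revClose : Int := PySem.Chars.find merged.reverse ['<'] + 1
    if idxOpen > (merged.length : Int) - revClose then hypothesis_tokens
    else
      let pre := pvPrefix hypothesis_tokens
      let f : Nat := PySem.List.bisectRight pre idxOpen - 1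
      let l : Nat := PySem.List.bisectRight pre ((merged.length : Int) - revClose) - 1
      PySem.List.slice hypothesis_tokens (some (f : Int)) (some (l : Int))
  else hypothesis_tokens

-- ===== PRECONDITION & SPEC =====
-- Pre_ excludes exactly the inputs on which A raises UnboundLocalError ('last_token' never
-- bound): those entering the stripping branch (first token starts with '<', last ends with '>',
-- some '>' preceding some '<' in the joined string) whose final token contains '<' past its
-- first character.
def Pre_stripXML (hypothesis_tokens : List String) : Prop :=
  ¬ (hypothesis_tokens ≠ [] ∧
     PySem.Str.startswith hypothesis_tokens.headI "<" = true ∧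
     PySem.Str.endswith (hypothesis_tokens.getLastD "") ">" = true ∧
     List.Sublist ['>', '<'] ((hypothesis_tokens.map String.toList).flatten) ∧
     '<' ∈ (hypothesis_tokens.getLastD "").toList.tail)
instance (hypothesis_tokens : List String) : Decidable (Pre_stripXML hypothesis_tokens) := by
  unfold Pre_stripXML; infer_instance
def pvWitness_stripXML : List String := ["<a>", "hi", "</a>"]

-- On inputs entering the stripping branch whose final token contains no '<' (the closing tag's
-- '<' lies in an earlier token), A always ends its slice at the second-to-last token, wrongly
-- keeping pieces of the closing tag (at the witness below, the tokens 'x' and '<b'); B ends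
-- the slice before the token containing that '<' (only 'x' there), the intended strip.
def D_stripXML (hypothesis_tokens : List String) : Prop :=
  hypothesis_tokens ≠ [] ∧
  PySem.Str.startswith hypothesis_tokens.headI "<" = true ∧
  PySem.Str.endswith (hypothesis_tokens.getLastD "") ">" = true ∧
  List.Sublist ['>', '<'] ((hypothesis_tokens.map String.toList).flatten) ∧
  '<' ∉ (hypothesis_tokens.getLastD "").toList
instance (hypothesis_tokens : List String) : Decidable (D_stripXML hypothesis_tokens) := by
  unfold D_stripXML; infer_instance
def Spec_stripXML (hypothesis_tokens : List String) (out : List String) : Prop :=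
  ¬ D_stripXML hypothesis_tokens → out = stripXML_alt hypothesis_tokens
instance (hypothesis_tokens : List String) (out : List String) : Decidable (Spec_stripXML hypothesis_tokens out) := by
  unfold Spec_stripXML; infer_instance
def pvDiffWitness_stripXML : List String := ["<a>", "x", "<b", ">"]
def pvDiffWitnessOut_stripXML : (List String) × (List String) := (["x", "<b"], ["x"])

-- ===== CLAIM (what is proved, stated in full; the proofs are below) =====
def Claim_unchanged_stripXML : Prop := ∀ (hypothesis_tokens : List String), Dom_stripXML hypothesis_tokens → Pre_stripXML hypothesis_tokens → Spec_stripXML hypothesis_tokens (stripXML hypothesis_tokens)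
def Claim_changed_stripXML : Prop := Dom_stripXML (pvDiffWitness_stripXML) ∧ Pre_stripXML (pvDiffWitness_stripXML) ∧ D_stripXML (pvDiffWitness_stripXML) ∧ stripXML (pvDiffWitness_stripXML) = pvDiffWitnessOut_stripXML.1 ∧ stripXML_alt (pvDiffWitness_stripXML) = pvDiffWitnessOut_stripXML.2 ∧ pvDiffWitnessOut_stripXML.1 ≠ pvDiffWitnessOut_stripXML.2
def Claim_exact_stripXML : Prop := ∀ (hypothesis_tokens : List String), Dom_stripXML hypothesis_tokens → Pre_stripXML hypothesis_tokens → D_stripXML hypothesis_tokens → stripXML hypothesis_tokens ≠ stripXML_alt hypothesis_tokens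

-- ===== LEMMAS AND PROOFS =====
-- proof-side abbreviations for the quantities A computes in its branch
def pvMerged (ts : List String) : List Char := PySem.Chars.join [] (ts.map String.toList)
def pvOpen (ts : List String) : Int := PySem.Chars.find (pvMerged ts) ['>'] + 1
def pvRev (ts : List String) : Int := PySem.Chars.find (pvMerged ts).reverse ['<'] + 1


theorem pvJoin_eq_flatten (xss : List (List Char)) : PySem.Chars.join [] xss = xss.flatten := by
  induction xss with
  | nil => rfl
  | cons a l ih =>
    cases l with
    | nil => simp [PySem.Chars.join, List.intercalate]
    | cons b m =>
      have h := PySem.Chars.join_cons_cons [] a b m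
      simp only [List.append_nil] at h
      simp [h, ← ih]

theorem pvStrLen_nonneg (s : String) : 0 ≤ PySem.Str.len s := by
  simp [PySem.Str.len_eq]

theorem pvSum_take_mono (ts : List String) {i j : Nat} (h : i ≤ j) :
    ((ts.take i).map PySem.Str.len).sum ≤ ((ts.take j).map PySem.Str.len).sum := by
  have hsplit : ts.take j = ts.take i ++ (ts.drop i).take (j - i) := by
    rw [← List.take_add]; congr 1; omega
  rw [hsplit, List.map_append, List.sum_append]
  have hnn : 0 ≤ (((ts.drop i).take (j - i)).map PySem.Str.len).sum := by
    apply List.sum_nonneg; intro x hx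
    simp only [List.mem_map] at hx
    obtain ⟨s, _, rfl⟩ := hx
    exact pvStrLen_nonneg s
  omega

theorem pvPrefix_length (ts : List String) : (pvPrefix ts).length = ts.length + 1 := by
  simp [pvPrefix, List.length_scanl]

theorem pvScanl_getElem (l : List Int) (a : Int) (j : Nat) (h : j < (List.scanl (· + ·) a l).length) :
    (List.scanl (· + ·) a l)[j] = a + (l.take j).sum := by
  induction l generalizing a j with
  | nil => simp at h; subst h; simp
  | cons x rest ih =>
    cases j with
    | zero => simp [List.scanl_cons]
    | succ m =>
      have h' : m < (List.scanl (· + ·) (a + x) rest).length := by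
        rw [List.scanl_cons] at h; simpa using h
      have hstep : (List.scanl (· + ·) a (x :: rest))[m + 1]'h
           = (List.scanl (· + ·) (a + x) rest)[m]'h' := by
        simp [List.scanl_cons]
      rw [hstep, ih (a + x) m h']
      simp [List.sum_cons]; ring

theorem pvPrefix_getElem (ts : List String) (j : Nat) (h : j < (pvPrefix ts).length) :
    (pvPrefix ts)[j] = ((ts.take j).map PySem.Str.len).sum := by
  unfold pvPrefix at h ⊢
  rw [pvScanl_getElem _ _ _ h, ← List.map_take]
  simp

theorem pvPrefix_sorted (ts : List String) : List.Pairwise (· ≤ ·) (pvPrefix ts) := by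
  rw [List.pairwise_iff_getElem]
  intro i j hi hj hij
  rw [pvPrefix_getElem ts i hi, pvPrefix_getElem ts j hj]
  exact pvSum_take_mono ts (le_of_lt hij)

-- bisectRight is determined by the cut point on a sorted list
theorem pvBisect_eq (xs : List Int) (x : Int) (hs : List.Pairwise (· ≤ ·) xs) (k : Nat)
    (hk : k ≤ xs.length)
    (hlow : ∀ j (hj : j < xs.length), j < k → xs[j] ≤ x)
    (hhigh : ∀ j (hj : j < xs.length), k ≤ j → x < xs[j]) :
    PySem.List.bisectRight xs x = k := by
  obtain ⟨hle, h1, h2⟩ := PySem.List.bisectRight_spec xs x hs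
  set b := PySem.List.bisectRight xs x with hb
  rcases lt_trichotomy b k with hlt | heq | hgt
  · have hbl : b < xs.length := lt_of_lt_of_le hlt hk
    have := hlow b hbl hlt
    have := h2 b hbl le_rfl
    omega
  · exact heq
  · have hkl : k < xs.length := lt_of_lt_of_le hgt hle
    have := h1 k hkl hgt
    have := hhigh k hkl le_rfl
    omega

-- A's first loop breaks at the first token whose cumulative length exceeds idx
theorem pvFirstLoop_break (ts : List String) (idx : Int) (i : Nat)
    (h0 : 0 ≤ idx) (hlt : idx < (ts.map PySem.Str.len).sum) :
    ∃ k, k < ts.length ∧ pvFirstLoop ts idx i = some (i + k) ∧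
      ((ts.take k).map PySem.Str.len).sum ≤ idx ∧
      idx < ((ts.take (k + 1)).map PySem.Str.len).sum := by
  induction ts generalizing idx i with
  | nil => simp at hlt; omega
  | cons t rest ih =>
    by_cases hc : PySem.Str.len t ≤ idx
    · have h0' : 0 ≤ idx - PySem.Str.len t := by omega
      have hlt' : idx - PySem.Str.len t < (rest.map PySem.Str.len).sum := by
        simp only [List.map_cons, List.sum_cons] at hlt; omega
      obtain ⟨k, hk, heq, hlo, hhi⟩ := ih (idx - PySem.Str.len t) (i + 1) h0' hlt'
      refine ⟨k + 1, by simpa using Nat.succ_lt_succ hk, ?_, ?_, ?_⟩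
      · rw [pvFirstLoop, if_pos hc, heq]; congr 1; omega
      · simp only [List.take_succ_cons, List.map_cons, List.sum_cons]; omega
      · simp only [List.take_succ_cons, List.map_cons, List.sum_cons] at hhi ⊢; omega
    · refine ⟨0, by simp, ?_, by simpa, ?_⟩
      · rw [pvFirstLoop, if_neg hc]; simp
      · simp only [List.take_succ_cons, List.take_zero, List.map_cons, List.map_nil,
          List.sum_cons, List.sum_nil]; omega

theorem pvMerged_len (ts : List String) :
    ((pvMerged ts).length : Int) = (ts.map PySem.Str.len).sum := by
  rw [pvMerged, pvJoin_eq_flatten, List.length_flatten]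
  simp only [List.map_map]
  induction ts with
  | nil => simp
  | cons a l ih => simp [ih, PySem.Str.len_eq]

theorem pvRev_pos (ts : List String) (hne : ts ≠ [])
    (hsw : PySem.Str.startswith ts.headI "<" = true) : 1 ≤ pvRev ts := by
  obtain ⟨h, t, rfl⟩ := List.exists_cons_of_ne_nil hne
  have hpre : ('<' :: []) <+: h.toList := by
    rw [PySem.Str.startswith_eq] at hsw
    simpa using (PySem.Chars.startswith_iff _ _).mp hsw
  have hmem : '<' ∈ pvMerged (h :: t) := by
    rw [pvMerged, pvJoin_eq_flatten]
    obtain ⟨s, hs⟩ := hpre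
    simp only [List.map_cons, List.flatten_cons, List.mem_append]
    left; rw [← hs]; simp
  have hinf : (['<'] : List Char) <:+: (pvMerged (h :: t)).reverse :=
    (List.singleton_infix_iff _ _).mpr (by simpa using hmem)
  have := (PySem.Chars.find_nonneg_iff _ _).mpr hinf
  unfold pvRev; omega

-- main branch lemma: under branch + guard + no raise + no intended change, both ports agree
theorem pvMain (ts : List String) (hne : ts ≠ [])
    (hsw : PySem.Str.startswith ts.headI "<" = true)
    (hew : PySem.Str.endswith (ts.getLastD "") ">" = true)
    (hguard : pvOpen ts ≤ ((pvMerged ts).length : Int) - pvRev ts)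
    (hlast : PySem.Str.len (ts.getLastD "") = pvRev ts) :
    stripXML ts = stripXML_alt ts := by
  obtain ⟨init, last, rfl⟩ : ∃ init last, ts = init ++ [last] := by
    rcases List.eq_nil_or_concat ts with h | ⟨l', b, h⟩
    · exact absurd h hne
    · exact ⟨l', b, by simpa [List.concat_eq_append] using h⟩
  set ts := init ++ [last] with hts
  have hlastD : ts.getLastD "" = last := by rw [hts]; exact List.getLastD_concat
  have hn : ts.length = init.length + 1 := by simp [hts]
  have hn0 : ¬ ts.length = 0 := by omega
  have hb : (PySem.Str.startswith ts.headI "<" && PySem.Str.endswith (ts.getLastD "") ">") = true := by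
    rw [hsw, hew]; rfl
  have hr1 : 1 ≤ pvRev ts := pvRev_pos ts hne hsw
  have ho0 : 0 ≤ pvOpen ts := by
    have := PySem.Chars.neg_one_le_find (pvMerged ts) ['>']
    unfold pvOpen; omega
  have hL : ((pvMerged ts).length : Int) = (ts.map PySem.Str.len).sum := pvMerged_len ts
  have hoL : pvOpen ts < (ts.map PySem.Str.len).sum := by omega
  -- A's first loop
  obtain ⟨k, hk, hfl, hlo, hhi⟩ := pvFirstLoop_break ts (pvOpen ts) 0 ho0 hoL
  -- B's first bisect lands one past the same index
  have hbf : PySem.List.bisectRight (pvPrefix ts) (pvOpen ts) = k + 1 := by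
    apply pvBisect_eq _ _ (pvPrefix_sorted ts) (k + 1)
    · rw [pvPrefix_length]; omega
    · intro j hj hjk
      rw [pvPrefix_getElem ts j hj]
      exact le_trans (pvSum_take_mono ts (by omega)) hlo
    · intro j hj hjk
      rw [pvPrefix_getElem ts j hj]
      exact lt_of_lt_of_le hhi (pvSum_take_mono ts (by omega))
  -- the joined length splits at the last token (whose length is pvRev here)
  have hsplit : (ts.map PySem.Str.len).sum = ((ts.take init.length).map PySem.Str.len).sum + pvRev ts := by
    have hl2 : PySem.Str.len last = pvRev ts := by rw [← hlastD]; exact hlast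
    rw [hts] at hl2 ⊢
    rw [List.take_left, List.map_append, List.sum_append]
    simp only [List.map_cons, List.map_nil, List.sum_cons, List.sum_nil]
    omega
  -- B's last bisect lands at the very end
  have hbl : PySem.List.bisectRight (pvPrefix ts) (((pvMerged ts).length : Int) - pvRev ts) = ts.length := by
    apply pvBisect_eq _ _ (pvPrefix_sorted ts) ts.length
    · rw [pvPrefix_length]; omega
    · intro j hj hjk
      rw [pvPrefix_getElem ts j hj, hL, hsplit]
      have : ((ts.take j).map PySem.Str.len).sum ≤ ((ts.take init.length).map PySem.Str.len).sum :=
        pvSum_take_mono ts (by omega)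
      omega
    · intro j hj hjk
      have hj' : j = ts.length := by rw [pvPrefix_length] at hj; omega
      subst hj'
      rw [pvPrefix_getElem ts _ hj, List.take_length, hL, hsplit]
      have : ((ts.take init.length).map PySem.Str.len).sum ≤ (ts.map PySem.Str.len).sum := by
        conv_rhs => rw [← List.take_length (l := ts)]
        exact pvSum_take_mono ts (by omega)
      omega
  -- A's reversed loop breaks immediately at the last token
  have hll : pvLastLoop ts.reverse (pvRev ts) (ts.length - 1) = some (ts.length - 1) := by
    rw [hts, List.reverse_append]
    show pvLastLoop (last :: init.reverse) _ _ = _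
    rw [pvLastLoop]
    have hc : ¬ PySem.Str.len last > pvRev ts := by
      have hl2 : PySem.Str.len last = pvRev ts := by rw [← hlastD]; exact hlast
      omega
    rw [if_neg (by rw [hts] at hc; exact hc)]
  -- assemble
  have hgd := not_lt.mpr hguard
  simp only [pvOpen, pvRev, pvMerged] at hgd hfl hll hbf hbl
  unfold stripXML stripXML_alt
  rw [if_neg hn0, if_neg hn0, if_pos hb, if_pos hb]
  simp only [if_neg hgd, hfl, hll, hbf, hbl]
  simp


theorem pvSingletonPrefix (s : List Char) (c : Char) (i : Nat) (h : i < s.length) :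
    ([c] <+: s.drop i) ↔ s[i] = c := by
  rw [List.drop_eq_getElem_cons h]
  constructor
  · intro hp
    exact ((List.cons_prefix_cons.mp hp).1).symm
  · intro hc
    exact List.cons_prefix_cons.mpr ⟨hc.symm, List.nil_prefix⟩

-- find points at the first occurrence: it lands below k exactly when c occurs among the first k chars
theorem pvFindLt (s : List Char) (c : Char) (k : Nat) :
    (0 ≤ PySem.Chars.find s [c] ∧ PySem.Chars.find s [c] < (k : Int)) ↔ c ∈ s.take k := by
  constructor
  · rintro ⟨h0, hk⟩
    obtain ⟨hpre, -⟩ := PySem.Chars.find_spec (s := s) (sub := [c]) h0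
    have hlen : (PySem.Chars.find s [c]).toNat < s.length := by
      by_contra hge
      rw [List.drop_eq_nil_of_le (by omega)] at hpre
      simp at hpre
    rw [pvSingletonPrefix s c _ hlen] at hpre
    exact List.mem_take_iff_getElem.mpr ⟨(PySem.Chars.find s [c]).toNat, by omega, hpre⟩
  · intro hmem
    obtain ⟨i, hik, hgi⟩ := List.mem_take_iff_getElem.mp hmem
    have hi : i < s.length := by have := List.length_take (i := k) (l := s); omega
    have h0 : 0 ≤ PySem.Chars.find s [c] := by
      rw [PySem.Chars.find_nonneg_iff]
      exact (List.singleton_infix_iff _ _).mpr (hgi ▸ List.getElem_mem hi)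
    refine ⟨h0, ?_⟩
    obtain ⟨-, hmin⟩ := PySem.Chars.find_spec (s := s) (sub := [c]) h0
    by_contra hge
    exact hmin i (by omega) ((pvSingletonPrefix s c i hi).mpr hgi)

theorem pvPairSub (m : List Char) (h : List.Sublist ['>','<'] m) :
    ∃ u v w, m = u ++ '>' :: v ++ '<' :: w := by
  obtain ⟨u, r, hm, hr⟩ : ∃ u r, m = u ++ '>' :: r ∧ List.Sublist ['<'] r := by
    induction m with
    | nil => simp at h
    | cons a t ih =>
      rcases h with _ | _
      case cons h' =>
        obtain ⟨u, r, hm, hr⟩ := ih h'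
        exact ⟨a :: u, r, by simp [hm], hr⟩
      case cons₂ h' =>
        exact ⟨[], t, rfl, h'⟩
  obtain ⟨v, w, hrw⟩ := List.append_of_mem (List.singleton_sublist.mp hr)
  exact ⟨u, v, w, by simp [hm, hrw]⟩

-- A's pattern-fit guard is exactly: some '>' strictly precedes some '<' in the joined string
theorem pvGuard_iff (m : List Char) (hgt : '>' ∈ m) (hlt : '<' ∈ m) :
    (PySem.Chars.find m ['>'] + 1 ≤ (m.length : Int) - (PySem.Chars.find m.reverse ['<'] + 1))
    ↔ List.Sublist ['>', '<'] m := by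
  have ho0 : 0 ≤ PySem.Chars.find m ['>'] := by
    rw [PySem.Chars.find_nonneg_iff]
    exact (List.singleton_infix_iff _ _).mpr hgt
  have hq0 : 0 ≤ PySem.Chars.find m.reverse ['<'] := by
    rw [PySem.Chars.find_nonneg_iff]
    exact (List.singleton_infix_iff _ _).mpr (List.mem_reverse.mpr hlt)
  constructor
  · intro hg
    set o := PySem.Chars.find m ['>'] with ho
    set q := PySem.Chars.find m.reverse ['<'] with hq
    obtain ⟨hpo, -⟩ := PySem.Chars.find_spec (s := m) (sub := ['>']) ho0
    obtain ⟨hpq, -⟩ := PySem.Chars.find_spec (s := m.reverse) (sub := ['<']) hq0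
    have hoL : o.toNat < m.length := by
      by_contra hge
      rw [List.drop_eq_nil_of_le (by omega)] at hpo
      simp at hpo
    have hqL : q.toNat < m.length := by
      by_contra hge
      rw [List.drop_eq_nil_of_le (by simpa using (by omega : m.reverse.length ≤ q.toNat))] at hpq
      simp at hpq
    rw [pvSingletonPrefix m '>' _ hoL] at hpo
    rw [pvSingletonPrefix m.reverse '<' _ (by simpa using hqL)] at hpq
    rw [List.getElem_reverse] at hpq
    have hp : m.length - 1 - q.toNat < m.length := by omega
    have hlt' : o.toNat + 1 ≤ m.length - 1 - q.toNat := by omega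
    have hdrop : '<' ∈ m.drop (o.toNat + 1) := by
      have he : (m.drop (o.toNat + 1))[(m.length - 1 - q.toNat) - (o.toNat + 1)]'(by
        rw [List.length_drop]; omega) = m[m.length - 1 - q.toNat]'hp := by
        rw [List.getElem_drop]; congr 1; omega
      have hmem := List.getElem_mem (l := m.drop (o.toNat + 1))
        (n := (m.length - 1 - q.toNat) - (o.toNat + 1)) (h := by rw [List.length_drop]; omega)
      rwa [he, hpq] at hmem
    have h1 : List.Sublist ['>', '<'] (m.drop o.toNat) := by
      rw [List.drop_eq_getElem_cons hoL, hpo]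
      exact (List.singleton_sublist.mpr hdrop).cons₂ '>'
    exact h1.trans (List.drop_sublist _ _)
  · intro hsub
    obtain ⟨u, v, w, rfl⟩ := pvPairSub _ hsub
    have ho : PySem.Chars.find (u ++ '>' :: v ++ '<' :: w) ['>'] < ((u.length + 1 : Nat) : Int) := by
      refine ((pvFindLt _ '>' (u.length + 1)).mpr ?_).2
      simp [List.take_append]
    have hrev : (u ++ '>' :: v ++ '<' :: w).reverse
        = w.reverse ++ '<' :: (v.reverse ++ '>' :: u.reverse) := by simp
    have hqv : PySem.Chars.find (u ++ '>' :: v ++ '<' :: w).reverse ['<'] < ((w.length + 1 : Nat) : Int) := by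
      refine ((pvFindLt _ '<' (w.length + 1)).mpr ?_).2
      rw [hrev]
      simp [List.take_append]
    have hL : ((u ++ '>' :: v ++ '<' :: w).length : Int) = u.length + v.length + w.length + 2 := by
      simp; push_cast; ring
    push_cast at ho hqv
    omega

-- take identities used to read find-positions off the final token
theorem pvTakeRevTail {α : Type} (l : List α) : l.reverse.take (l.length - 1) = l.tail.reverse := by
  cases l with
  | nil => simp
  | cons h t => simp [List.take_append]

theorem pvLtMem (ts : List String) (hne : ts ≠ [])
    (hsw : PySem.Str.startswith ts.headI "<" = true) :
    '<' ∈ (ts.map String.toList).flatten := by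
  obtain ⟨h, t, rfl⟩ := List.exists_cons_of_ne_nil hne
  have hpre : ('<' :: []) <+: h.toList := by
    rw [PySem.Str.startswith_eq] at hsw
    simpa using (PySem.Chars.startswith_iff _ _).mp hsw
  obtain ⟨s, hs⟩ := hpre
  simp only [List.map_cons, List.flatten_cons, List.mem_append]
  left; rw [← hs]; simp

theorem stripXML_spec : Claim_unchanged_stripXML := by
  intro ts _hdom hpre hnd
  show stripXML ts = stripXML_alt ts
  by_cases h0 : ts.length = 0
  · unfold stripXML stripXML_alt; rw [if_pos h0, if_pos h0]
  · by_cases hb : (PySem.Str.startswith ts.headI "<" && PySem.Str.endswith (ts.getLastD "") ">") = true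
    · obtain ⟨hsw, hew⟩ := (Bool.and_eq_true _ _).mp hb
      by_cases hgd : pvOpen ts > ((pvMerged ts).length : Int) - pvRev ts
      · -- pattern-fit guard fails: both return the input unchanged
        have hgd' : PySem.Chars.find (PySem.Chars.join [] (ts.map String.toList)) ['>'] + 1 >
            (((PySem.Chars.join [] (ts.map String.toList)).length : Int)) -
            (PySem.Chars.find (PySem.Chars.join [] (ts.map String.toList)).reverse ['<'] + 1) := by
          simpa only [pvOpen, pvRev, pvMerged] using hgd
        unfold stripXML stripXML_alt
        rw [if_neg h0, if_neg h0, if_pos hb, if_pos hb]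
        simp only [if_pos hgd']
      · have hne : ts ≠ [] := by intro h; subst h; simp at h0
        have hguard := not_lt.mp hgd
        have hm : pvMerged ts = (ts.map String.toList).flatten := by
          rw [pvMerged, pvJoin_eq_flatten]
        -- the final token is nonempty and ends with '>'
        have hsuf : ('>' :: []) <:+ (ts.getLastD "").toList := by
          rw [PySem.Str.endswith_eq] at hew
          simpa using (PySem.Chars.endswith_iff _ _).mp hew
        obtain ⟨init, lastS, rfl⟩ : ∃ init lastS, ts = init ++ [lastS] := by
          rcases List.eq_nil_or_concat ts with h | ⟨l', b', h⟩
          · exact absurd h hne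
          · exact ⟨l', b', by simpa [List.concat_eq_append] using h⟩
        set ts := init ++ [lastS] with hts
        have hlastD : ts.getLastD "" = lastS := by rw [hts]; exact List.getLastD_concat
        rw [hlastD] at hsuf
        have hlne : 1 ≤ lastS.toList.length := by
          obtain ⟨u, hu⟩ := hsuf
          rw [← hu]; simp
        -- the joined string splits before the final token
        have hflat : (ts.map String.toList).flatten
            = (init.map String.toList).flatten ++ lastS.toList := by
          rw [hts]; simp
        have hgtm : '>' ∈ (ts.map String.toList).flatten := by
          rw [hflat]
          obtain ⟨u, hu⟩ := hsuf
          exact List.mem_append_right _ (by rw [← hu]; simp)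
        have hltm : '<' ∈ (ts.map String.toList).flatten := pvLtMem ts hne hsw
        -- A's guard is the pair-subsequence condition
        have hsub : List.Sublist ['>', '<'] ((ts.map String.toList).flatten) := by
          rw [← pvGuard_iff _ hgtm hltm, ← hm]
          simpa only [pvOpen, pvRev, pvMerged] using hguard
        -- Pre_ and ¬D_ pin '<' to the very start of the final token
        have hnotail : '<' ∉ (ts.getLastD "").toList.tail := fun h =>
          hpre ⟨hne, hsw, hew, hsub, h⟩
        have hin : '<' ∈ (ts.getLastD "").toList := by
          by_contra h; exact hnd ⟨hne, hsw, hew, hsub, h⟩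
        rw [hlastD] at hnotail hin
        -- hence the reversed find lands exactly at the final token's length
        have hq0 : 0 ≤ PySem.Chars.find ((ts.map String.toList).flatten).reverse ['<'] := by
          rw [PySem.Chars.find_nonneg_iff]
          exact (List.singleton_infix_iff _ _).mpr (List.mem_reverse.mpr hltm)
        have hrevlast : ((ts.map String.toList).flatten).reverse
            = lastS.toList.reverse ++ ((init.map String.toList).flatten).reverse := by
          rw [hflat, List.reverse_append]
        have hup : PySem.Chars.find ((ts.map String.toList).flatten).reverse ['<']
            < (lastS.toList.length : Int) := by
          refine ((pvFindLt _ '<' lastS.toList.length).mpr ?_).2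
          rw [hrevlast, List.take_append_of_le_length (by simp), List.take_of_length_le (by simp)]
          exact List.mem_reverse.mpr hin
        have hlow : ¬ (PySem.Chars.find ((ts.map String.toList).flatten).reverse ['<']
            < ((lastS.toList.length - 1 : Nat) : Int)) := by
          intro hlow'
          apply hnotail
          have hmem := (pvFindLt _ '<' (lastS.toList.length - 1)).mp ⟨hq0, hlow'⟩
          rw [hrevlast, List.take_append_of_le_length (by simp),
            pvTakeRevTail] at hmem
          exact List.mem_reverse.mp hmem
        apply pvMain ts hne hsw hew hguard
        rw [hlastD, PySem.Str.len_eq]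
        have hrv : pvRev ts = PySem.Chars.find ((ts.map String.toList).flatten).reverse ['<'] + 1 := by
          rw [pvRev, hm]
        rw [hrv]
        have : ((lastS.toList.length - 1 : Nat) : Int) = (lastS.toList.length : Int) - 1 := by
          omega
        rw [this] at hlow
        omega
    · unfold stripXML stripXML_alt
      rw [if_neg h0, if_neg h0, if_neg hb, if_neg hb]

theorem stripXML_changed : Claim_changed_stripXML := by
  unfold Claim_changed_stripXML; decide

theorem pvTight (ts : List String) (hne : ts ≠ [])
    (hsw : PySem.Str.startswith ts.headI "<" = true)
    (hew : PySem.Str.endswith (ts.getLastD "") ">" = true)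
    (hguard : pvOpen ts ≤ ((pvMerged ts).length : Int) - pvRev ts)
    (hlastlt : PySem.Str.len (ts.getLastD "") < pvRev ts) :
    stripXML ts ≠ stripXML_alt ts := by
  obtain ⟨init, lastS, rfl⟩ : ∃ init lastS, ts = init ++ [lastS] := by
    rcases List.eq_nil_or_concat ts with h | ⟨l', b', h⟩
    · exact absurd h hne
    · exact ⟨l', b', by simpa [List.concat_eq_append] using h⟩
  set ts := init ++ [lastS] with hts
  have hlastD : ts.getLastD "" = lastS := by rw [hts]; exact List.getLastD_concat
  have hn : ts.length = init.length + 1 := by simp [hts]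
  have hn0 : ¬ ts.length = 0 := by omega
  have hb : (PySem.Str.startswith ts.headI "<" && PySem.Str.endswith (ts.getLastD "") ">") = true := by
    rw [hsw, hew]; rfl
  have hr1 : 1 ≤ pvRev ts := pvRev_pos ts hne hsw
  have ho0 : 0 ≤ pvOpen ts := by
    have := PySem.Chars.neg_one_le_find (pvMerged ts) ['>']
    unfold pvOpen; omega
  have hL : ((pvMerged ts).length : Int) = (ts.map PySem.Str.len).sum := pvMerged_len ts
  -- the cut point L - rev lies strictly before the last token
  have hsplit : (ts.map PySem.Str.len).sum
      = ((ts.take init.length).map PySem.Str.len).sum + PySem.Str.len lastS := by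
    rw [hts, List.take_left, List.map_append, List.sum_append]
    simp only [List.map_cons, List.map_nil, List.sum_cons, List.sum_nil]
    omega
  have hcut : ((pvMerged ts).length : Int) - pvRev ts
      < ((ts.take init.length).map PySem.Str.len).sum := by
    rw [hlastD] at hlastlt
    omega
  have hoL : pvOpen ts < (ts.map PySem.Str.len).sum := by
    have hmono : ((ts.take init.length).map PySem.Str.len).sum ≤ (ts.map PySem.Str.len).sum := by
      conv_rhs => rw [← List.take_length (l := ts)]
      exact pvSum_take_mono ts (by omega)
    omega
  -- A's first loop
  obtain ⟨k, hk, hfl, hlo, hhi⟩ := pvFirstLoop_break ts (pvOpen ts) 0 ho0 hoL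
  -- the break index lies strictly before the last token
  have hkinit : k < init.length := by
    by_contra hge
    have := pvSum_take_mono ts (i := init.length) (j := k) (by omega)
    omega
  -- B's first bisect agrees with A's loop
  have hbf : PySem.List.bisectRight (pvPrefix ts) (pvOpen ts) = k + 1 := by
    apply pvBisect_eq _ _ (pvPrefix_sorted ts) (k + 1)
    · rw [pvPrefix_length]; omega
    · intro j hj hjk
      rw [pvPrefix_getElem ts j hj]
      exact le_trans (pvSum_take_mono ts (by omega)) hlo
    · intro j hj hjk
      rw [pvPrefix_getElem ts j hj]
      exact lt_of_lt_of_le hhi (pvSum_take_mono ts (by omega))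
  -- B's last bisect stops before the last token
  have hble : PySem.List.bisectRight (pvPrefix ts) (((pvMerged ts).length : Int) - pvRev ts)
      ≤ init.length := by
    obtain ⟨hle, h1, -⟩ :=
      PySem.List.bisectRight_spec (pvPrefix ts) (((pvMerged ts).length : Int) - pvRev ts)
        (pvPrefix_sorted ts)
    by_contra hgt
    have hjl : init.length < (pvPrefix ts).length := by rw [pvPrefix_length]; omega
    have := h1 init.length hjl (by omega)
    rw [pvPrefix_getElem ts init.length hjl] at this
    omega
  -- A's reversed loop breaks immediately at the last token
  have hll : pvLastLoop ts.reverse (pvRev ts) (ts.length - 1) = some (ts.length - 1) := by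
    rw [hts, List.reverse_append]
    show pvLastLoop (lastS :: init.reverse) _ _ = _
    rw [pvLastLoop]
    have hc : ¬ PySem.Str.len lastS > pvRev ts := by
      rw [hlastD] at hlastlt; omega
    rw [if_neg (by rw [hts] at hc; exact hc)]
  -- assemble: A's slice ends at the last token, B's strictly earlier, so the lengths differ
  have hgd := not_lt.mpr hguard
  simp only [pvOpen, pvRev, pvMerged] at hgd hfl hll hbf hble
  unfold stripXML stripXML_alt
  rw [if_neg hn0, if_neg hn0, if_pos hb, if_pos hb]
  simp only [if_neg hgd, hfl, hll, hbf]
  intro heq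
  have hlen := congrArg List.length heq
  simp only [PySem.List.length_slice, PySem.List.clampIdx_natCast] at hlen
  omega

theorem stripXML_tight : Claim_exact_stripXML := by
  intro ts _hdom _hpre hd
  obtain ⟨hne, hsw, hew, hsub, hnin⟩ := hd
  have hgt : '>' ∈ (ts.map String.toList).flatten := hsub.subset (by simp)
  have hlt : '<' ∈ (ts.map String.toList).flatten := hsub.subset (by simp)
  have hguard : pvOpen ts ≤ ((pvMerged ts).length : Int) - pvRev ts := by
    have h := (pvGuard_iff _ hgt hlt).mpr hsub
    simp only [pvOpen, pvRev, pvMerged, pvJoin_eq_flatten]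
    exact h
  have hq0 : 0 ≤ PySem.Chars.find ((ts.map String.toList).flatten).reverse ['<'] := by
    rw [PySem.Chars.find_nonneg_iff]
    exact (List.singleton_infix_iff _ _).mpr (List.mem_reverse.mpr hlt)
  obtain ⟨init, lastS, hts⟩ : ∃ init lastS, ts = init ++ [lastS] := by
    rcases List.eq_nil_or_concat ts with h | ⟨l', b', h⟩
    · exact absurd h hne
    · exact ⟨l', b', by simpa [List.concat_eq_append] using h⟩
  have hlastD : ts.getLastD "" = lastS := by rw [hts]; exact List.getLastD_concat
  have hrevlast : ((ts.map String.toList).flatten).reverse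
      = lastS.toList.reverse ++ ((init.map String.toList).flatten).reverse := by
    rw [hts]; simp
  have hlastlt : PySem.Str.len (ts.getLastD "") < pvRev ts := by
    have hnot : ¬ (PySem.Chars.find ((ts.map String.toList).flatten).reverse ['<']
        < (lastS.toList.length : Int)) := by
      intro hlow
      apply hnin
      have hmem := (pvFindLt _ '<' lastS.toList.length).mp ⟨hq0, hlow⟩
      rw [hrevlast, List.take_append_of_le_length (by simp),
        List.take_of_length_le (by simp)] at hmem
      rw [hlastD]
      exact List.mem_reverse.mp hmem
    rw [hlastD, PySem.Str.len_eq]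
    have hrv : pvRev ts = PySem.Chars.find ((ts.map String.toList).flatten).reverse ['<'] + 1 := by
      rw [pvRev, pvMerged, pvJoin_eq_flatten]
    omega
  exact pvTight ts hne hsw hew hguard hlastlt
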